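-- pv_equiv track=rewrite | github.com/kartikey20/HackerEarth | Problems/Monk_and_Inversions.py | solve
-- ===== SOURCE A (Python) =====
-- def solve(ls):
--     rowLen = len(ls[0])
--     colLen = len(ls)
--     count = 0
--     for row in range(rowLen):
--         for col in range(colLen):
--             x = ls[row][col]
--             for row2 in range(row, rowLen):
--                 for col2 in range(col, colLen):
--                     y = ls[row2][col2]
--                     if x > y:
--                         count += 1
--     return count
-- ===== SOURCE B (Python) =====
-- def _bisect_left(a, x):
--     # CPython's bisect_left loop, written out (no imports allowed here)
--     lo, hi = 0, len(a)
--     while lo < hi: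
--         mid = (lo + hi) // 2
--         if a[mid] < x:
--             lo = mid + 1
--         else:
--             hi = mid
--     return lo
--
--
-- def solve(ls):
--     nrows = len(ls)
--     ncols = len(ls[0])
--     total = 0
--     for r in range(nrows):
--         X = ls[r]
--         for r2 in range(r, nrows):
--             Y = ls[r2]
--             s = []  # sorted multiset of Y[c:ncols]
--             for c in range(ncols - 1, -1, -1):
--                 v = Y[c]
--                 s.insert(_bisect_left(s, v), v)
--                 total += _bisect_left(s, X[c])
--     return total
-- ===== Notes on version B (the rewrite author's own statement) =====
-- stated objective: faster
-- what changed: Instead of, for each anchor cell, rescanning its whole dominated quadrant (four nested index loops), B fixes a pair of rows, sweeps the column index right-to-left while maintaining a sorted list of the lower row's suffix values, and counts smaller values with a binary search, removing the innermost two scans.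
import Mathlib
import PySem

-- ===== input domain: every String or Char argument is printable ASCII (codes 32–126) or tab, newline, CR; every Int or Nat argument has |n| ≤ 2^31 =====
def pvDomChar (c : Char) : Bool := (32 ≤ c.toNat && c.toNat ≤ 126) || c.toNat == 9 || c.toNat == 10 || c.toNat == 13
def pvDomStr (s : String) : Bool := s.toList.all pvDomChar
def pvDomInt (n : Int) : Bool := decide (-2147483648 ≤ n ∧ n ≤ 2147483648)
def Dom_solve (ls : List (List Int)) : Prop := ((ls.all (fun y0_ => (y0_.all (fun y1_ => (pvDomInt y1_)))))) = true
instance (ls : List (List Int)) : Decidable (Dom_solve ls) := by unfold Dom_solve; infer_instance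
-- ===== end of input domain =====

-- B replaces A's per-anchor rescan of the whole dominated quadrant (four nested loops) by a
-- right-to-left column sweep per row pair that keeps the lower row's suffix sorted and counts
-- smaller values by binary search.

-- ===== PORT A =====
def solve (ls : List (List Int)) : Int :=
  let rowLen : Int := ((ls.headD []).length : Int)
  let colLen : Int := (ls.length : Int)
  (PySem.List.pyRange 0 rowLen 1).foldl (fun count row =>
    (PySem.List.pyRange 0 colLen 1).foldl (fun count col =>
      let x := PySem.List.pyGetD (PySem.List.pyGetD ls row []) col 0
      (PySem.List.pyRange row rowLen 1).foldl (fun count row2 =>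
        (PySem.List.pyRange col colLen 1).foldl (fun count col2 =>
          let y := PySem.List.pyGetD (PySem.List.pyGetD ls row2 []) col2 0
          if x > y then count + 1 else count) count) count) count) 0

-- ===== PORT B =====
-- Source B's `_bisect_left` is CPython's bisect_left loop verbatim; its exact PySem model is
-- PySem.List.bisectLeft. `s.insert(i, v)` is PySem.List.insert.
def solve_alt (ls : List (List Int)) : Int :=
  let nrows : Int := (ls.length : Int)
  let ncols : Int := ((ls.headD []).length : Int)
  (PySem.List.pyRange 0 nrows 1).foldl (fun total r =>
    let X := PySem.List.pyGetD ls r []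
    (PySem.List.pyRange r nrows 1).foldl (fun total r2 =>
      let Y := PySem.List.pyGetD ls r2 []
      ((PySem.List.pyRange (ncols - 1) (-1) (-1)).foldl (fun (st : List Int × Int) c =>
        let v := PySem.List.pyGetD Y c 0
        let s := PySem.List.insert st.1 ((PySem.List.bisectLeft st.1 v : Nat) : Int) v
        (s, st.2 + ((PySem.List.bisectLeft s (PySem.List.pyGetD X c 0) : Nat) : Int)))
        (([] : List Int), total)).2) total) 0

-- ===== PRECONDITION & SPEC =====
-- Pre_solve is exactly the set of inputs on which A returns (A indexes rows by len(ls[0]) and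
-- columns by len(ls), so it raises IndexError unless ls is empty-first-row or square up to
-- rows being allowed extra trailing columns).
def Pre_solve (ls : List (List Int)) : Prop :=
  ls ≠ [] ∧ ((ls.headD []).length = 0 ∨
    ((ls.headD []).length = ls.length ∧ ∀ row ∈ ls, ls.length ≤ row.length))
instance (ls : List (List Int)) : Decidable (Pre_solve ls) := by unfold Pre_solve; infer_instance

def pvWitness_solve : List (List Int) := [[1, 2], [3, 0]]

def Spec_solve (ls : List (List Int)) (out : Int) : Prop := out = solve_alt ls
instance (ls : List (List Int)) (out : Int) : Decidable (Spec_solve ls out) := by unfold Spec_solve; infer_instance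

-- ===== CLAIM (what is proved, stated in full; the proofs are below) =====
def Claim_equal_solve : Prop := ∀ (ls : List (List Int)), Dom_solve ls → Pre_solve ls → Spec_solve ls (solve ls)

-- ===== LEMMAS AND PROOFS =====


-- countP of a list split by an index threshold
theorem countP_eq_of_split (xs : List Int) (x : Int) (k : Nat) (hk : k ≤ xs.length)
    (hlt : ∀ (j : Nat) (hj : j < xs.length), j < k → xs[j] < x)
    (hge : ∀ (j : Nat) (hj : j < xs.length), k ≤ j → x ≤ xs[j]) :
    xs.countP (fun y => decide (y < x)) = k := by
  have h1 : (xs.take k).countP (fun y => decide (y < x)) = (xs.take k).length := by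
    apply List.countP_eq_length.mpr
    intro a ha
    obtain ⟨i, hi, rfl⟩ := List.mem_iff_getElem.mp ha
    have hil : i < k ∧ i < xs.length := by simpa [List.length_take] using hi
    rw [List.getElem_take]
    simp only [decide_eq_true_eq]
    exact hlt i hil.2 hil.1
  have h2 : (xs.drop k).countP (fun y => decide (y < x)) = 0 := by
    apply List.countP_eq_zero.mpr
    intro a ha
    obtain ⟨i, hi, rfl⟩ := List.mem_iff_getElem.mp ha
    have hil : k + i < xs.length := by have := List.length_drop (l := xs) (i := k); omega
    rw [List.getElem_drop]
    simp only [decide_eq_true_eq, not_lt]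
    exact hge (k + i) hil (by omega)
  have := List.countP_append (l₁ := xs.take k) (l₂ := xs.drop k) (p := fun y => decide (y < x))
  rw [List.take_append_drop] at this
  rw [this, h1, h2, List.length_take]
  omega

theorem bisect_count (s : List Int) (hs : s.Pairwise (· ≤ ·)) (x : Int) :
    PySem.List.bisectLeft s x = s.countP (fun y => decide (y < x)) := by
  obtain ⟨h1, h2, h3⟩ := PySem.List.bisectLeft_spec s x hs
  exact (countP_eq_of_split s x _ h1 (fun j hj hlt => h2 j hj hlt) (fun j hj hle => h3 j hj hle)).symm

theorem insert_bisect (s : List Int) (hs : s.Pairwise (· ≤ ·)) (v : Int) :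
    (PySem.List.insert s ((PySem.List.bisectLeft s v : Nat) : Int) v).Pairwise (· ≤ ·) ∧
    (PySem.List.insert s ((PySem.List.bisectLeft s v : Nat) : Int) v).Perm (v :: s) := by
  obtain ⟨h1, h2, h3⟩ := PySem.List.bisectLeft_spec s v hs
  set k := PySem.List.bisectLeft s v with hk
  rw [PySem.List.insert_natCast s k v h1]
  constructor
  · have hsplit : s = s.take k ++ s.drop k := (List.take_append_drop k s).symm
    rw [hsplit] at hs
    rw [List.pairwise_append] at hs ⊢
    obtain ⟨hA, hB, hAB⟩ := hs
    refine ⟨hA, ?_, ?_⟩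
    · rw [List.pairwise_cons]
      refine ⟨?_, hB⟩
      intro y hy
      obtain ⟨i, hi, rfl⟩ := List.mem_iff_getElem.mp hy
      have hil : k + i < s.length := by have := List.length_drop (l := s) (i := k); omega
      rw [List.getElem_drop]
      exact h3 (k + i) hil (by omega)
    · intro a ha b hb
      rcases List.mem_cons.mp hb with rfl | hb
      · obtain ⟨i, hi, rfl⟩ := List.mem_iff_getElem.mp ha
        have hil : i < k ∧ i < s.length := by simpa [List.length_take] using hi
        rw [List.getElem_take]
        exact le_of_lt (h2 i hil.2 hil.1)
      · exact hAB a ha b hb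
  · have := List.perm_middle (a := v) (l₁ := List.take k s) (l₂ := List.drop k s)
    rwa [List.take_append_drop] at this

theorem innerB (X Y : List Int) (m : Nat) (hmY : m ≤ Y.length) :
    ∀ (k : Nat), k ≤ m → ∀ (s : List Int) (t : Int),
    s.Pairwise (· ≤ ·) → s.Perm ((Y.take m).drop k) →
    ((PySem.List.pyRange ((k : Int) - 1) (-1) (-1)).foldl
      (fun (st : List Int × Int) c =>
        (PySem.List.insert st.1 ((PySem.List.bisectLeft st.1 (PySem.List.pyGetD Y c 0) : Nat) : Int) (PySem.List.pyGetD Y c 0),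
         st.2 + ((PySem.List.bisectLeft
            (PySem.List.insert st.1 ((PySem.List.bisectLeft st.1 (PySem.List.pyGetD Y c 0) : Nat) : Int) (PySem.List.pyGetD Y c 0))
            (PySem.List.pyGetD X c 0) : Nat) : Int)))
      (s, t)).2
    = t + ((List.range k).map (fun c =>
        ((((Y.take m).drop c).countP (fun y => decide (y < X.getD c 0)) : Nat) : Int))).sum := by
  intro k
  induction k with
  | zero =>
    intro _ s t _ _
    rw [show ((0 : Nat) : Int) - 1 = -1 by norm_num, PySem.List.pyRange_neg_one_eq_nil le_rfl]
    simp
  | succ k ih =>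
    intro hk s t hs hperm
    have hkm : k < m := hk
    have hkY : k < Y.length := lt_of_lt_of_le hkm hmY
    rw [show ((k + 1 : Nat) : Int) - 1 = (k : Int) by push_cast; ring,
        PySem.List.pyRange_neg_one_cons (by omega)]
    rw [List.foldl_cons]
    have hv : PySem.List.pyGetD Y ((k : Nat) : Int) 0 = Y[k] := by
      rw [PySem.List.pyGetD_natCast]; exact List.getD_eq_getElem Y 0 hkY
    have hdropk : (Y.take m).drop k = Y[k] :: (Y.take m).drop (k + 1) := by
      rw [List.drop_eq_getElem_cons (by simp [List.length_take]; omega)]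
      congr 1
      exact List.getElem_take
    obtain ⟨hs', hperm'⟩ := insert_bisect s hs (PySem.List.pyGetD Y ((k : Nat) : Int) 0)
    set v := PySem.List.pyGetD Y ((k : Nat) : Int) 0 with hvdef
    set s' := PySem.List.insert s ((PySem.List.bisectLeft s v : Nat) : Int) v with hs'def
    have hperm'' : s'.Perm ((Y.take m).drop k) := by
      rw [hdropk, ← hv]
      exact hperm'.trans (List.Perm.cons v hperm)
    have hcnt : ((PySem.List.bisectLeft s' (PySem.List.pyGetD X ((k : Nat) : Int) 0) : Nat) : Int)
        = ((((Y.take m).drop k).countP (fun y => decide (y < X.getD k 0)) : Nat) : Int) := by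
      rw [bisect_count s' hs', hperm''.countP_eq, PySem.List.pyGetD_natCast]
    have := ih (le_of_lt hkm) s' (t + ((PySem.List.bisectLeft s' (PySem.List.pyGetD X ((k : Nat) : Int) 0) : Nat) : Int)) hs' hperm''
    rw [this, hcnt, List.range_succ, List.map_append, List.sum_append]
    simp
    ring

theorem sum_map_swap {α β : Type} (l1 : List α) (l2 : List β) (f : α → β → Int) :
    (l1.map (fun a => (l2.map (fun b => f a b)).sum)).sum
      = (l2.map (fun b => (l1.map (fun a => f a b)).sum)).sum := by
  induction l1 with
  | nil => simp
  | cons a l1 ih =>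
    simp only [List.sum_cons, ih, List.map, ← PySem.List.sum_map_add_int]

theorem foldl_body_add {α : Type} (l : List α) (f : Int → α → Int) (g : α → Int) (init : Int)
    (h : ∀ (acc : Int), ∀ x ∈ l, f acc x = acc + g x) :
    l.foldl f init = init + (l.map g).sum := by
  rw [PySem.List.foldl_congr_mem l f (fun acc x => acc + g x) init h, PySem.List.foldl_add]

theorem pyGetD_take (Y : List Int) (nn : Nat) (j : Int) (h0 : 0 ≤ j) (h1 : j < (nn : Int))
    (hn : nn ≤ Y.length) :
    PySem.List.pyGetD (Y.take nn) j 0 = PySem.List.pyGetD Y j 0 := by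
  rw [PySem.List.pyGetD_eq_getElem _ _ h0 (by simp [List.length_take]; omega),
      PySem.List.pyGetD_eq_getElem _ _ h0 (by exact_mod_cast lt_of_lt_of_le h1 (by exact_mod_cast hn))]
  exact List.getElem_take

-- the value counted by A's innermost loop, as a countP on the lower row's suffix
theorem countP_pyRange_vals (Y : List Int) (nn : Nat) (hn : nn ≤ Y.length) (c : Int) (h0 : 0 ≤ c)
    (x : Int) :
    (PySem.List.pyRange c (nn : Int) 1).countP (fun j => decide (x > PySem.List.pyGetD Y j 0))
      = ((Y.take nn).drop c.toNat).countP (fun y => decide (y < x)) := by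
  have hmap : (PySem.List.pyRange c ((nn : Int)) 1).map (fun j => PySem.List.pyGetD (Y.take nn) j 0)
      = (Y.take nn).drop c.toNat := by
    have hl : PySem.List.len (Y.take nn) = (nn : Int) := by
      simp [PySem.List.len, List.length_take]; omega
    rw [← hl]; exact PySem.List.map_pyGetD_pyRange (Y.take nn) 0 h0
  rw [← hmap, List.countP_map]
  apply List.countP_congr
  intro j hj
  obtain ⟨hj0, hj1⟩ := PySem.List.mem_pyRange_one.mp hj
  simp only [Function.comp, GT.gt, pyGetD_take Y nn j (le_trans h0 hj0) hj1 hn]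

def G (ls : List (List Int)) (nc : Nat) (row col row2 : Int) : Int :=
  (((((PySem.List.pyGetD ls row2 []).take nc).drop col.toNat).countP
    (fun y => decide (y < PySem.List.pyGetD (PySem.List.pyGetD ls row []) col 0)) : Nat) : Int)

theorem B_red (ls : List (List Int))
    (hrows : ∀ row ∈ ls, (ls.headD []).length ≤ row.length) :
    solve_alt ls = ((PySem.List.pyRange 0 (ls.length : Int) 1).map (fun r =>
      ((PySem.List.pyRange r (ls.length : Int) 1).map (fun r2 =>
        ((List.range (ls.headD []).length).map (fun (c : Nat) => G ls (ls.headD []).length r (Int.ofNat c) r2)).sum)).sum)).sum := by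
  simp only [solve_alt]
  rw [foldl_body_add _ _ (fun r =>
      ((PySem.List.pyRange r (ls.length : Int) 1).map (fun r2 =>
        ((List.range (ls.headD []).length).map (fun (c : Nat) => G ls (ls.headD []).length r (Int.ofNat c) r2)).sum)).sum) 0 ?_, zero_add]
  intro acc r hr
  rw [foldl_body_add _ _ (fun r2 =>
      ((List.range (ls.headD []).length).map (fun (c : Nat) => G ls (ls.headD []).length r (Int.ofNat c) r2)).sum) acc ?_]
  intro acc2 r2 hr2
  obtain ⟨hr2a, hr2b⟩ := PySem.List.mem_pyRange_one.mp hr2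
  obtain ⟨hra, _⟩ := PySem.List.mem_pyRange_one.mp hr
  have hYmem : PySem.List.pyGetD ls r2 [] ∈ ls := by
    rw [PySem.List.pyGetD_eq_getElem _ _ (le_trans hra hr2a) (by exact_mod_cast hr2b)]
    exact List.getElem_mem _
  have hmY : (ls.headD []).length ≤ (PySem.List.pyGetD ls r2 []).length := hrows _ hYmem
  have hdrop : (([] : List Int)).Perm (((PySem.List.pyGetD ls r2 []).take (ls.headD []).length).drop (ls.headD []).length) := by
    rw [List.drop_of_length_le (by simp [List.length_take])]
  have := innerB (PySem.List.pyGetD ls r []) (PySem.List.pyGetD ls r2 []) (ls.headD []).length hmY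
      (ls.headD []).length le_rfl [] acc2 (List.Pairwise.nil) hdrop
  rw [this]
  simp [G, PySem.List.pyGetD_natCast]

theorem A_red (ls : List (List Int)) (hm : ((ls.headD []).length : Int) = (ls.length : Int)) (hrows : ∀ row ∈ ls, ls.length ≤ row.length) :
    solve ls = ((PySem.List.pyRange 0 (ls.length : Int) 1).map (fun row =>
      ((PySem.List.pyRange 0 (ls.length : Int) 1).map (fun col =>
        ((PySem.List.pyRange row (ls.length : Int) 1).map (fun row2 =>
          G ls ls.length row col row2)).sum)).sum)).sum := by
  simp only [solve, hm]
  rw [foldl_body_add _ _ (fun row =>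
      ((PySem.List.pyRange 0 (ls.length : Int) 1).map (fun col =>
        ((PySem.List.pyRange row (ls.length : Int) 1).map (fun row2 =>
          G ls ls.length row col row2)).sum)).sum) 0 ?_, zero_add]
  intro acc row hrow
  obtain ⟨hrowa, hrowb⟩ := PySem.List.mem_pyRange_one.mp hrow
  rw [foldl_body_add _ _ (fun col =>
      ((PySem.List.pyRange row (ls.length : Int) 1).map (fun row2 =>
        G ls ls.length row col row2)).sum) acc ?_]
  intro acc2 col hcol
  obtain ⟨hcola, hcolb⟩ := PySem.List.mem_pyRange_one.mp hcol
  rw [foldl_body_add _ _ (fun row2 => G ls ls.length row col row2) acc2 ?_]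
  intro acc3 row2 hrow2
  obtain ⟨hrow2a, hrow2b⟩ := PySem.List.mem_pyRange_one.mp hrow2
  have hYmem : PySem.List.pyGetD ls row2 [] ∈ ls := by
    rw [PySem.List.pyGetD_eq_getElem _ _ (le_trans hrowa hrow2a) (by exact_mod_cast hrow2b)]
    exact List.getElem_mem _
  rw [PySem.List.foldl_ite_add_one
      (fun col2 => PySem.List.pyGetD (PySem.List.pyGetD ls row []) col 0 > PySem.List.pyGetD (PySem.List.pyGetD ls row2 []) col2 0)]
  rw [countP_pyRange_vals (PySem.List.pyGetD ls row2 []) ls.length (hrows _ hYmem) col hcola]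
  rfl

theorem pyRange_zero_map_sum (n : Nat) (f : Int → Int) :
    ((PySem.List.pyRange 0 (n : Int) 1).map f).sum = ((List.range n).map (fun c => f (Int.ofNat c))).sum := by
  rw [PySem.List.pyRange_one, List.map_map]
  have h : ((n : Int) - 0).toNat = n := by omega
  rw [h]
  apply congrArg List.sum
  apply List.map_congr_left
  intro c _
  simp [Int.ofNat_eq_natCast]

theorem main_equiv (ls : List (List Int))
    (hpre : ls ≠ [] ∧ ((ls.headD []).length = 0 ∨
      ((ls.headD []).length = ls.length ∧ ∀ row ∈ ls, ls.length ≤ row.length))) :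
    solve ls = solve_alt ls := by
  rcases hpre with ⟨hne, hm0 | ⟨hm, hrows⟩⟩
  · -- degenerate: first row empty, A's outer loop and B's column sweep are both empty
    rw [B_red ls (by intro row _; rw [hm0]; omega)]
    have hm0' : (ls.head?.getD []).length = 0 := by
      simpa [List.headD_eq_head?_getD] using hm0
    simp [solve, hm0', PySem.List.pyRange_one_eq_nil (le_refl (0 : Int))]
  · rw [A_red ls (by exact_mod_cast hm) hrows, B_red ls (by intro row hrow; rw [hm]; exact hrows row hrow), hm]
    apply congrArg List.sum
    apply List.map_congr_left
    intro row _
    rw [sum_map_swap]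
    apply congrArg List.sum
    apply List.map_congr_left
    intro row2 _
    rw [pyRange_zero_map_sum]

-- ===== VERDICT (by name: the statement is the Claim_ definition above) =====
theorem solve_spec : Claim_equal_solve := by
  intro ls _ hpre
  show solve ls = solve_alt ls
  exact main_equiv ls hpre
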